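-- pv_equiv track=rewrite | github.com/acdh-oeaw/AMC_Corpus_Biases | scripts/utils/retrive_wikidata.py | get_probs_by_type
-- ===== SOURCE A (Python) =====
-- def get_probs_by_type(res, names):
--     ret = {}
--     cprobs = []
--     rid = names[0]
--     other = names[1:]
--
--     for r in res["results"]["bindings"]:
--         if(rid in r):
--             if(r[rid]["value"] in ret):
--                 cprobs = ret[r[rid]["value"]]
--             else:
--                 cprobs = [set() for _ in range(len(other))]
--                 ret[r[rid]["value"]] = cprobs
--
--             for (i, prob) in enumerate(other):
--                 if(prob in r):
--                     cprobs[i].add(r[prob]["value"])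
--     return ret
-- ===== SOURCE B (Python) =====
-- def get_probs_by_type(res, names):
--     rid, *other = names
--     bindings = res["results"]["bindings"]
--     keyed = [(r[rid]["value"], r) for r in bindings if rid in r]
--     order = list(dict.fromkeys(k for k, _ in keyed))
--     return {
--         k: [{r[p]["value"] for kk, r in keyed if kk == k and p in r}
--             for p in other]
--         for k in order
--     }
-- ===== Notes on version B (the rewrite author's own statement) =====
-- stated objective: alternative
-- what changed: Replaces A's single pass that incrementally grows a dict of mutable set-lists with a group-by decomposition: collect the (key, binding) pairs once, dedup the keys for first-appearance order, then build each key's list of value sets by per-field comprehension scans over the kept bindings.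
import Mathlib
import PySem

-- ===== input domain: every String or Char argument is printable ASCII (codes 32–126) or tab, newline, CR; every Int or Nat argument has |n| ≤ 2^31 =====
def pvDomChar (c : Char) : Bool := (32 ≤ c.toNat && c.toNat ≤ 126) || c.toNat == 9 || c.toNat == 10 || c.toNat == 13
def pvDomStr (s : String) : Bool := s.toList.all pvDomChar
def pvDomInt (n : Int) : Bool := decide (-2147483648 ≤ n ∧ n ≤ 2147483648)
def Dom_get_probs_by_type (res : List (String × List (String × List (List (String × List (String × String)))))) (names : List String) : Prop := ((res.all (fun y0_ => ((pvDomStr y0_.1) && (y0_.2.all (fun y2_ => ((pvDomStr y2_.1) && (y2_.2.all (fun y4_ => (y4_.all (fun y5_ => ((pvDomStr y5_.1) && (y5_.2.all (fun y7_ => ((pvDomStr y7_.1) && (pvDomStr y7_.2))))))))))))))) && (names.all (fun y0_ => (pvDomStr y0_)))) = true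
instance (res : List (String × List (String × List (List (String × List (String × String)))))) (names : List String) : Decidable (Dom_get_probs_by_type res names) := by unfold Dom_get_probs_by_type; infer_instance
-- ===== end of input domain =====

-- B groups by first-appearance key list and rebuilds each key's value sets by per-field scans,
-- instead of A's single pass mutating a dict of set-lists (objective: alternative decomposition).
-- ===== PORT A =====
def get_probs_by_type (res : List (String × List (String × List (List (String × List (String × String)))))) (names : List String) : List (String × List (List String)) :=
  match names with
  | [] => []  -- names[0] raises IndexError in Python; excluded by Pre_
  | rid :: other =>
    match (PySem.Dict.mk res).get? "results" with
    | none => []  -- KeyError; excluded by Pre_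
    | some resultsv =>
      match (PySem.Dict.mk resultsv).get? "bindings" with
      | none => []  -- KeyError; excluded by Pre_
      | some bs =>
        (bs.foldl (fun ret r =>
          match (PySem.Dict.mk r).get? rid with
          | none => ret
          | some d0 =>
            match (PySem.Dict.mk d0).get? "value" with
            | none => ret  -- KeyError; excluded by Pre_
            | some key =>
              let cprobs : List (PySem.Set String) :=
                match ret.get? key with
                | some c => c
                | none => (PySem.List.pyRange 0 (other.length : Int) 1).map
                    (fun _ => (PySem.Set.empty : PySem.Set String))
              let cprobs' := (PySem.List.enumerate other 0).foldl (fun cp ip =>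
                match (PySem.Dict.mk r).get? ip.2 with
                | none => cp
                | some dp =>
                  match (PySem.Dict.mk dp).get? "value" with
                  | none => cp  -- KeyError; excluded by Pre_
                  | some v =>
                    match PySem.List.pyGet? cp ip.1 with
                    | none => cp  -- unreachable: cprobs has length len(other)
                    | some s => PySem.List.pySetD cp ip.1 (PySem.Set.add s v)) cprobs
              ret.insert key cprobs')
          (PySem.Dict.empty : PySem.Dict String (List (PySem.Set String)))).items

-- ===== PORT B =====
def get_probs_by_type_alt (res : List (String × List (String × List (List (String × List (String × String)))))) (names : List String) : List (String × List (List String)) :=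
  match names with
  | [] => []  -- unpacking 'rid, *other = names' raises; excluded by Pre_
  | rid :: other =>
    match (PySem.Dict.mk res).get? "results" with
    | none => []  -- KeyError; excluded by Pre_
    | some resultsv =>
      match (PySem.Dict.mk resultsv).get? "bindings" with
      | none => []  -- KeyError; excluded by Pre_
      | some bs =>
        let keyed := bs.filterMap (fun r =>
          (((PySem.Dict.mk r).get? rid).bind (fun d => (PySem.Dict.mk d).get? "value")).map
            (fun k => (k, r)))
        let order := PySem.List.dedup (keyed.map (·.1))
        order.map (fun k => (k, other.map (fun p =>
          PySem.Set.ofList (keyed.filterMap (fun kr =>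
            if kr.1 == k then
              ((PySem.Dict.mk kr.2).get? p).bind (fun d => (PySem.Dict.mk d).get? "value")
            else none)))))

-- ===== PRECONDITION & SPEC =====
-- Pre_ excludes exactly the inputs where Python A raises: empty names (IndexError on names[0]),
-- a missing "results"/"bindings" key, and a binding whose accessed field dicts lack "value" (KeyError).
def Pre_get_probs_by_type (res : List (String × List (String × List (List (String × List (String × String)))))) (names : List String) : Prop :=
  (match names with
   | [] => false
   | rid :: _ =>
     match (PySem.Dict.mk res).get? "results" with
     | none => false
     | some resultsv =>
       match (PySem.Dict.mk resultsv).get? "bindings" with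
       | none => false
       | some bs =>
         bs.all (fun r =>
           !((PySem.Dict.mk r).contains rid) ||
           names.all (fun n =>
             match (PySem.Dict.mk r).get? n with
             | none => true
             | some d => (PySem.Dict.mk d).contains "value"))) = true
instance (res : List (String × List (String × List (List (String × List (String × String)))))) (names : List String) : Decidable (Pre_get_probs_by_type res names) := by unfold Pre_get_probs_by_type; infer_instance

def pvWitness_get_probs_by_type : (List (String × List (String × List (List (String × List (String × String)))))) × List String :=
  ([("results", [("bindings", [[("id", [("value", "a")]), ("p", [("value", "x")])],
                               [("id", [("value", "a")])]])])], ["id", "p"])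

def Spec_get_probs_by_type (res : List (String × List (String × List (List (String × List (String × String)))))) (names : List String) (out : List (String × List (List String))) : Prop := out = get_probs_by_type_alt res names
instance (res : List (String × List (String × List (List (String × List (String × String)))))) (names : List String) (out : List (String × List (List String))) : Decidable (Spec_get_probs_by_type res names out) := by unfold Spec_get_probs_by_type; infer_instance

-- ===== CLAIM (what is proved, stated in full; the proofs are below) =====
def Claim_equal_get_probs_by_type : Prop := ∀ (res : List (String × List (String × List (List (String × List (String × String)))))) (names : List String), Dom_get_probs_by_type res names → Pre_get_probs_by_type res names → Spec_get_probs_by_type res names (get_probs_by_type res names)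

-- ===== LEMMAS AND PROOFS =====

-- the key r[rid]["value"] of a binding, none if absent
def pvKeyOf (rid : String) (r : List (String × List (String × String))) : Option String :=
  ((PySem.Dict.mk r).get? rid).bind (fun d => (PySem.Dict.mk d).get? "value")

def pvKeyed (rid : String) (bs : List (List (String × List (String × String)))) :
    List (String × List (String × List (String × String))) :=
  bs.filterMap (fun r => (pvKeyOf rid r).map (fun k => (k, r)))

def pvVals (keyed : List (String × List (String × List (String × String)))) (k p : String) :
    List String :=
  keyed.filterMap (fun kr => if kr.1 == k then pvKeyOf p kr.2 else none)

-- the value B stores under key k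
def pvRow (other : List String) (keyed : List (String × List (String × List (String × String)))) (k : String) : List (PySem.Set String) :=
  other.map (fun p => PySem.Set.ofList (pvVals keyed k p))

def pvBuild (rid : String) (other : List String) (bs : List (List (String × List (String × String)))) : PySem.Dict String (List (PySem.Set String)) :=
  PySem.Dict.mk ((PySem.List.dedup ((pvKeyed rid bs).map (·.1))).map
    (fun k => (k, pvRow other (pvKeyed rid bs) k)))

-- A's loop body, named
def pvStep (rid : String) (other : List String)
    (ret : PySem.Dict String (List (PySem.Set String)))
    (r : List (String × List (String × String))) : PySem.Dict String (List (PySem.Set String)) :=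
  match (PySem.Dict.mk r).get? rid with
  | none => ret
  | some d0 =>
    match (PySem.Dict.mk d0).get? "value" with
    | none => ret
    | some key =>
      let cprobs : List (PySem.Set String) :=
        match ret.get? key with
        | some c => c
        | none => (PySem.List.pyRange 0 (other.length : Int) 1).map
            (fun _ => (PySem.Set.empty : PySem.Set String))
      let cprobs' := (PySem.List.enumerate other 0).foldl (fun cp ip =>
        match (PySem.Dict.mk r).get? ip.2 with
        | none => cp
        | some dp =>
          match (PySem.Dict.mk dp).get? "value" with
          | none => cp
          | some v =>
            match PySem.List.pyGet? cp ip.1 with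
            | none => cp
            | some s => PySem.List.pySetD cp ip.1 (PySem.Set.add s v)) cprobs
      ret.insert key cprobs'

-- lookup in a dict literally built as a map over keys
theorem pv_get?_mk_map {β : Type} (f : String → β) :
    ∀ (ks : List String) (k0 : String),
      (PySem.Dict.mk (ks.map (fun k => (k, f k)))).get? k0
        = if k0 ∈ ks then some (f k0) else none := by
  intro ks k0
  induction ks with
  | nil => simp [PySem.Dict.get?]
  | cons k ks ih =>
    rw [List.map_cons, PySem.Dict.get?_mk_cons, ih]
    by_cases h : k = k0
    · subst h; simp
    · have h2 : ¬ k0 = k := fun hh => h hh.symm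
      simp [List.mem_cons, beq_eq_false_iff_ne.mpr h, h2]

theorem pv_set_append {α : Type} : ∀ (pre : List α) (y v : α) (ys : List α),
    (pre ++ y :: ys).set pre.length v = pre ++ v :: ys := by
  intro pre
  induction pre with
  | nil => intro y v ys; rfl
  | cons x pre ih => intro y v ys; simp [List.set_cons_succ, ih]

theorem pv_inner_fold (r : List (String × List (String × String))) :
    ∀ (l : List String) (f : String → PySem.Set String) (pre : List (PySem.Set String)),
      (PySem.List.enumerate l (pre.length : Int)).foldl (fun cp ip =>
        match (PySem.Dict.mk r).get? ip.2 with
        | none => cp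
        | some dp =>
          match (PySem.Dict.mk dp).get? "value" with
          | none => cp
          | some v =>
            match PySem.List.pyGet? cp ip.1 with
            | none => cp
            | some s => PySem.List.pySetD cp ip.1 (PySem.Set.add s v)) (pre ++ l.map f)
      = pre ++ l.map (fun p =>
          match pvKeyOf p r with
          | none => f p
          | some v => PySem.Set.add (f p) v) := by
  intro l
  induction l with
  | nil => intro f pre; simp [PySem.List.enumerate]
  | cons a l ih =>
    intro f pre
    rw [PySem.List.enumerate_cons, List.foldl_cons, List.map_cons, List.map_cons]
    cases h1 : (PySem.Dict.mk r).get? a with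
    | none =>
      have hk : pvKeyOf a r = none := by simp [pvKeyOf, h1]
      rw [show pre ++ f a :: List.map f l = (pre ++ [f a]) ++ List.map f l by simp]
      rw [show ((pre.length : Int) + 1) = (((pre ++ [f a]).length : Int)) by simp, ih]
      simp [hk]
    | some dp =>
      cases h2 : (PySem.Dict.mk dp).get? "value" with
      | none =>
        have hk : pvKeyOf a r = none := by simp [pvKeyOf, h1, h2]
        simp only [h2]
        rw [show pre ++ f a :: List.map f l = (pre ++ [f a]) ++ List.map f l by simp]
        rw [show ((pre.length : Int) + 1) = (((pre ++ [f a]).length : Int)) by simp, ih]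
        simp [hk]
      | some v =>
        have hk : pvKeyOf a r = some v := by simp [pvKeyOf, h1, h2]
        simp only [h2, PySem.List.pyGet?_append_length, PySem.List.pySetD_natCast,
          pv_set_append]
        rw [show pre ++ PySem.Set.add (f a) v :: List.map f l
              = (pre ++ [PySem.Set.add (f a) v]) ++ List.map f l by simp]
        rw [show ((pre.length : Int) + 1) = (((pre ++ [PySem.Set.add (f a) v]).length : Int)) by simp, ih]
        simp [hk]

theorem pv_vals_append_ne (keyed : List (String × List (String × List (String × String))))
    (k k' p : String) (r : List (String × List (String × String))) (h : k ≠ k') :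
    pvVals (keyed ++ [(k, r)]) k' p = pvVals keyed k' p := by
  simp [pvVals, List.filterMap_append]
  exact fun he => absurd he h

theorem pv_vals_append_self (keyed : List (String × List (String × List (String × String))))
    (k p : String) (r : List (String × List (String × String))) :
    pvVals (keyed ++ [(k, r)]) k p = pvVals keyed k p ++ (pvKeyOf p r).toList := by
  cases h : pvKeyOf p r <;> simp [pvVals, List.filterMap_append, h]

theorem pv_vals_nil_of_not_mem (keyed : List (String × List (String × List (String × String))))
    (k p : String) (h : k ∉ keyed.map (·.1)) : pvVals keyed k p = [] := by
  rw [pvVals, List.filterMap_eq_nil_iff]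
  intro kr hm
  have : kr.1 ≠ k := fun he => h (he ▸ List.mem_map_of_mem hm)
  simp [beq_eq_false_iff_ne.mpr this]

theorem pv_row_fresh (other : List String)
    (keyed : List (String × List (String × List (String × String)))) (k : String)
    (h : k ∉ keyed.map (·.1)) :
    pvRow other keyed k = other.map (fun _ => (PySem.Set.empty : PySem.Set String)) := by
  unfold pvRow
  exact List.map_congr_left (fun p _ => by rw [pv_vals_nil_of_not_mem keyed k p h]; rfl)

theorem pv_row_append_ne (other : List String)
    (keyed : List (String × List (String × List (String × String))))
    (k k' : String) (r : List (String × List (String × String))) (h : k ≠ k') :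
    pvRow other (keyed ++ [(k, r)]) k' = pvRow other keyed k' :=
  List.map_congr_left (fun p _ => by rw [pv_vals_append_ne _ _ _ _ _ h])

theorem pv_row_append_self (other : List String)
    (keyed : List (String × List (String × List (String × String))))
    (k : String) (r : List (String × List (String × String))) :
    pvRow other (keyed ++ [(k, r)]) k
      = other.map (fun p =>
          match pvKeyOf p r with
          | none => PySem.Set.ofList (pvVals keyed k p)
          | some v => PySem.Set.add (PySem.Set.ofList (pvVals keyed k p)) v) :=
  List.map_congr_left (fun p _ => by
    rw [pv_vals_append_self]
    cases h : pvKeyOf p r with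
    | none => simp
    | some v => simp [PySem.Set.ofList_append_singleton])

theorem pv_inner_fold0 (r : List (String × List (String × String)))
    (l : List String) (f : String → PySem.Set String) :
    (PySem.List.enumerate l 0).foldl (fun cp ip =>
        match (PySem.Dict.mk r).get? ip.2 with
        | none => cp
        | some dp =>
          match (PySem.Dict.mk dp).get? "value" with
          | none => cp
          | some v =>
            match PySem.List.pyGet? cp ip.1 with
            | none => cp
            | some s => PySem.List.pySetD cp ip.1 (PySem.Set.add s v)) (l.map f)
      = l.map (fun p =>
          match pvKeyOf p r with
          | none => f p
          | some v => PySem.Set.add (f p) v) := by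
  have h := pv_inner_fold r l f []
  simpa using h

theorem pv_step_build (rid : String) (other : List String)
    (r : List (String × List (String × String)))
    (bs : List (List (String × List (String × String)))) :
    pvStep rid other (pvBuild rid other bs) r = pvBuild rid other (bs ++ [r]) := by
  cases h1 : (PySem.Dict.mk r).get? rid with
  | none =>
    simp [pvStep, h1, pvBuild, pvKeyed, List.filterMap_append, pvKeyOf]
  | some d0 =>
    cases h2 : (PySem.Dict.mk d0).get? "value" with
    | none =>
      simp [pvStep, h1, h2, pvBuild, pvKeyed, List.filterMap_append, pvKeyOf]
    | some k =>
      have hkeyed : pvKeyed rid (bs ++ [r]) = pvKeyed rid bs ++ [(k, r)] := by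
        simp [pvKeyed, List.filterMap_append, pvKeyOf, h1, h2]
      have hcprobs :
          (match (pvBuild rid other bs).get? k with
            | some c => c
            | none => (PySem.List.pyRange 0 (other.length : Int) 1).map
                (fun _ => (PySem.Set.empty : PySem.Set String)))
          = pvRow other (pvKeyed rid bs) k := by
        rw [pvBuild, pv_get?_mk_map]
        by_cases hmem : k ∈ PySem.List.dedup ((pvKeyed rid bs).map (·.1))
        · rw [if_pos hmem]
        · rw [if_neg hmem]
          have hfresh : k ∉ (pvKeyed rid bs).map (·.1) := by
            simpa [PySem.List.mem_dedup] using hmem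
          rw [pv_row_fresh other _ k hfresh, List.map_const', List.map_const',
            PySem.List.length_pyRange_one]
          simp
      have hstep : pvStep rid other (pvBuild rid other bs) r
          = (pvBuild rid other bs).insert k (pvRow other (pvKeyed rid bs ++ [(k, r)]) k) := by
        rw [pvStep]
        simp only [h1, h2, hcprobs]
        rw [pvRow, pv_inner_fold0, pv_row_append_self]
      rw [hstep]
      have hK' : PySem.List.dedup (((pvKeyed rid bs) ++ [(k, r)]).map (·.1))
          = PySem.Set.add (PySem.List.dedup ((pvKeyed rid bs).map (·.1))) k := by
        simp [PySem.Set.ofList_append_singleton]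
      apply PySem.Dict.ext
      by_cases hmem : k ∈ PySem.List.dedup ((pvKeyed rid bs).map (·.1))
      · have hcont : (pvBuild rid other bs).contains k = true := by
          rw [PySem.Dict.contains_iff_mem_keys, pvBuild]
          simpa using hmem
        rw [PySem.Dict.items_insert_of_contains _ _ hcont]
        rw [pvBuild, pvBuild, hkeyed, hK']
        rw [PySem.Set.add_of_mem hmem]
        show (List.map _ _).map _ = _
        rw [List.map_map]
        apply List.map_congr_left
        intro k' hk'
        by_cases he : k' = k
        · subst he; simp
        · simp only [Function.comp]
          rw [pv_row_append_ne _ _ _ _ _ (fun hh => he hh.symm)]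
          simp [beq_eq_false_iff_ne.mpr he]
      · have hcont : (pvBuild rid other bs).contains k = false := by
          rw [← Bool.not_eq_true, PySem.Dict.contains_iff_mem_keys, pvBuild]
          simpa using hmem
        rw [PySem.Dict.items_insert_of_not_contains _ _ hcont]
        rw [pvBuild, pvBuild, hkeyed, hK']
        rw [PySem.Set.add_of_not_mem hmem]
        show List.map _ _ ++ _ = _
        rw [List.map_append]
        congr 1
        apply List.map_congr_left
        intro k' hk'
        have he : k' ≠ k := fun hh => hmem (hh ▸ hk')
        rw [pv_row_append_ne _ _ _ _ _ (fun hh => he hh.symm)]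

theorem pv_foldA (rid : String) (other : List String)
    (bs : List (List (String × List (String × String)))) :
    bs.foldl (pvStep rid other) PySem.Dict.empty = pvBuild rid other bs := by
  induction bs using List.reverseRecOn with
  | nil => rfl
  | append_singleton bs r ih =>
    rw [List.foldl_append, List.foldl_cons, List.foldl_nil, ih, pv_step_build]

theorem get_probs_by_type_spec' (res : List (String × List (String × List (List (String × List (String × String)))))) (names : List String) :
    get_probs_by_type res names = get_probs_by_type_alt res names := by
  cases names with
  | nil => rfl
  | cons rid other =>
    simp only [get_probs_by_type, get_probs_by_type_alt]
    cases h1 : (PySem.Dict.mk res).get? "results" with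
    | none => rfl
    | some resultsv =>
      dsimp only
      cases h2 : (PySem.Dict.mk resultsv).get? "bindings" with
      | none => rfl
      | some bs =>
        dsimp only
        show (bs.foldl (pvStep rid other) PySem.Dict.empty).items = _
        rw [pv_foldA]
        rfl

-- ===== VERDICT (by name: the statement is the Claim_ definition above) =====
theorem get_probs_by_type_spec : Claim_equal_get_probs_by_type := by
  intro res names _ _
  exact get_probs_by_type_spec' res names
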